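-- pv_equiv track=rewrite | github.com/Ricky-Hu5918/Python-Lab | 492_Construct_the_Rectangle.py | constructRectangle3
-- ===== SOURCE A (Python) =====
-- import math
--
-- def constructRectangle3(area: int):
--     start = int(math.sqrt(area))
--     end = start
--
--     '''#3: two pointers'''
--     while (start <= end):
--         if (start*end == area):
--             return [end, start]
--         elif (start*end < area):
--             end += 1
--         else:
--             start -= 1
--
--     return [area, 1]
-- ===== SOURCE B (Python) =====
-- import math
--
-- def constructRectangle3(area: int):
--     if area == 0:
--         return [0, 0]
--     w = math.isqrt(area)
--     while area % w != 0:
--         w -= 1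
--     return [area // w, w]
-- ===== Notes on version B (the rewrite author's own statement) =====
-- stated objective: simpler
-- what changed: B keeps a single candidate width, starting at isqrt(area) and decrementing until it divides area, instead of A's two-pointer walk comparing start*end to area.
import Mathlib
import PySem

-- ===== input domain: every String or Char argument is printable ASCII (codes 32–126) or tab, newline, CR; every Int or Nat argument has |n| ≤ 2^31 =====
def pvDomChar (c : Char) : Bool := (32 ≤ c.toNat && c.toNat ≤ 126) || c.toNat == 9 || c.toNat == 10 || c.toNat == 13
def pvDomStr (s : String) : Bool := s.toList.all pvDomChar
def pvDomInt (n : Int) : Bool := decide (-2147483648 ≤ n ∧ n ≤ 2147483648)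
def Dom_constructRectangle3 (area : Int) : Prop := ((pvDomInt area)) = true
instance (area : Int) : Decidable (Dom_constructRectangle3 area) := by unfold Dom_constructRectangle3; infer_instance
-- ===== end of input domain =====

-- B replaces A's two-pointer walk by a single decrementing divisor search from isqrt(area): simpler.

-- ===== PORT A =====
-- int(math.sqrt(area)): on the domain |area| ≤ 2^31 the float sqrt is exact enough that
-- int(math.sqrt(area)) = isqrt(area) = Nat.sqrt; negative area raises ValueError (outside Pre_).
def intSqrtA (area : Int) : Int := Int.ofNat (Nat.sqrt area.toNat)

-- the 'while (start <= end)' loop, step for step; fuel is an upper bound on the number of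
-- iterations (proved sufficient under Pre_); the fuel-0 value repeats the loop's fallthrough.
def loopA (fuel : Nat) (area s e : Int) : List Int :=
  match fuel with
  | 0 => [area, 1]
  | f+1 =>
    if s ≤ e then
      if s * e = area then [e, s]
      else if s * e < area then loopA f area s (e+1)
      else loopA f area (s-1) e
    else [area, 1]

def constructRectangle3 (area : Int) : List Int :=
  loopA (area.toNat + 1) area (intSqrtA area) (intSqrtA area)

-- ===== PORT B =====
-- the 'while area % w != 0: w -= 1' loop; fuel = initial w (proved sufficient under Pre_).
def loopB (area : Int) : Nat → Int → List Int
  | 0, w => [PySem.Int.floordiv area w, w]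
  | f+1, w =>
    if PySem.Int.mod area w ≠ 0 then loopB area f (w - 1)
    else [PySem.Int.floordiv area w, w]

def constructRectangle3_alt (area : Int) : List Int :=
  if area = 0 then [0, 0]
  else loopB area (Nat.sqrt area.toNat) (Int.ofNat (Nat.sqrt area.toNat))

-- ===== PRECONDITION & SPEC =====
-- A raises ValueError (math.sqrt of a negative) exactly when area < 0.
def Pre_constructRectangle3 (area : Int) : Prop := 0 ≤ area
instance (area : Int) : Decidable (Pre_constructRectangle3 area) := by unfold Pre_constructRectangle3; infer_instance
def pvWitness_constructRectangle3 : Int := (12)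

def Spec_constructRectangle3 (area : Int) (out : List Int) : Prop := out = constructRectangle3_alt area
instance (area : Int) (out : List Int) : Decidable (Spec_constructRectangle3 area out) := by unfold Spec_constructRectangle3; infer_instance

-- ===== CLAIM (what is proved, stated in full; the proofs are below) =====
def Claim_equal_constructRectangle3 : Prop := ∀ (area : Int), Dom_constructRectangle3 area → Pre_constructRectangle3 area → Spec_constructRectangle3 area (constructRectangle3 area)

-- ===== LEMMAS AND PROOFS =====

-- For area = n ≥ 1 let w be the largest divisor of n with w*w ≤ n and c = n / w.
-- A's loop returns [c, w] from any state w ≤ s ≤ e ≤ c with enough fuel.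
theorem loopA_inv (n w c : Nat) (hw1 : 1 ≤ w) (hwc : w * c = n)
    (hmax : ∀ d : Nat, d ∣ n → d * d ≤ n → d ≤ w) :
    ∀ (f s e : Nat), w ≤ s → s ≤ e → e ≤ c → (c - e) + (s - w) < f →
      loopA f (n : Int) (s : Int) (e : Int) = [(c : Int), (w : Int)] := by
  intro f
  induction f with
  | zero => intro s e _ _ _ h; omega
  | succ f ih =>
    intro s e hws hse hec hfuel
    have hse' : (s : Int) ≤ (e : Int) := by exact_mod_cast hse
    simp only [loopA, if_pos hse']
    by_cases heq : (s : Int) * (e : Int) = (n : Int)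
    · -- return [e, s]; s must be w and e must be c
      have heqN : s * e = n := by exact_mod_cast heq
      have hsd : s ∣ n := ⟨e, heqN.symm⟩
      have hss : s * s ≤ n := by calc s * s ≤ s * e := Nat.mul_le_mul_left s hse
                                    _ = n := heqN
      have hsw : s ≤ w := hmax s hsd hss
      have hsweq : s = w := le_antisymm hsw hws
      have hec' : e = c := by
        subst hsweq
        have : s * e = s * c := by rw [heqN, hwc]
        exact Nat.eq_of_mul_eq_mul_left (by omega) this
      rw [if_pos heq, hsweq, hec']
    · rw [if_neg heq]
      by_cases hlt : (s : Int) * (e : Int) < (n : Int)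
      · -- end += 1 : e < c must hold
        have hltN : s * e < n := by exact_mod_cast hlt
        have hecs : e < c := by
          by_contra hcon
          have hce : c ≤ e := by omega
          have : w * c ≤ s * e := Nat.mul_le_mul hws hce
          omega
        rw [if_pos hlt]
        have : ((e : Int) + 1) = ((e + 1 : Nat) : Int) := by push_cast; ring
        rw [this]
        exact ih s (e+1) hws (by omega) (by omega) (by omega)
      · -- start -= 1 : w < s must hold
        have hgtN : n < s * e := by
          have : (n : Int) < (s : Int) * (e : Int) := by
            rcases lt_trichotomy ((s : Int) * (e : Int)) ((n : Int)) with h | h | h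
            · exact absurd h hlt
            · exact absurd h heq
            · exact h
          exact_mod_cast this
        have hws' : w < s := by
          by_contra hcon
          have hsweq : s = w := by omega
          have : s * e ≤ n := by
            subst hsweq
            calc s * e ≤ s * c := Nat.mul_le_mul_left s hec
                 _ = n := hwc
          omega
        rw [if_neg hlt]
        have : ((s : Int) - 1) = ((s - 1 : Nat) : Int) := by
          have : 1 ≤ s := by omega
          push_cast [this]; ring
        rw [this]
        exact ih (s-1) e (by omega) (by omega) hec (by omega)

-- B's loop returns [c, w] from any candidate w ≤ v with v*v ≤ n and enough fuel.
theorem loopB_inv (n w c : Nat) (hw1 : 1 ≤ w) (hwc : w * c = n)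
    (hmax : ∀ d : Nat, d ∣ n → d * d ≤ n → d ≤ w) :
    ∀ (f v : Nat), w ≤ v → v * v ≤ n → v - w ≤ f →
      loopB (n : Int) f (v : Int) = [(c : Int), (w : Int)] := by
  intro f
  induction f with
  | zero =>
    intro v hwv hvv hf
    have hv : v = w := by omega
    subst hv
    have hdvd : v ∣ n := ⟨c, hwc.symm⟩
    simp only [loopB]
    rw [PySem.Int.floordiv_natCast]
    have : n / v = c := by
      rw [← hwc]; exact Nat.mul_div_cancel_left c (by omega)
    rw [this]
  | succ f ih =>
    intro v hwv hvv hf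
    simp only [loopB]
    by_cases hdvd : (v : Int) ∣ (n : Int)
    · have hmod : PySem.Int.mod (n : Int) (v : Int) = 0 :=
        (PySem.Int.mod_eq_zero_iff_dvd _ _).mpr hdvd
      rw [if_neg (by simpa using hmod)]
      have hdvdN : v ∣ n := by exact_mod_cast hdvd
      have hvw : v = w := le_antisymm (hmax v hdvdN hvv) hwv
      subst hvw
      rw [PySem.Int.floordiv_natCast]
      have hc : c = n / v := by
        rw [← hwc]; exact (Nat.mul_div_cancel_left c (by omega)).symm
      rw [← hc]
    · have hmod : PySem.Int.mod (n : Int) (v : Int) ≠ 0 := by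
        intro h; exact hdvd ((PySem.Int.mod_eq_zero_iff_dvd _ _).mp h)
      rw [if_pos hmod]
      have hneq : v ≠ w := by
        intro h; subst h; exact hdvd (by exact_mod_cast (⟨c, hwc.symm⟩ : v ∣ n))
      have h1v : 1 ≤ v := by omega
      have : ((v : Int) - 1) = ((v - 1 : Nat) : Int) := by push_cast [h1v]; ring
      rw [this]
      exact ih (v-1) (by omega) (by
        calc (v-1) * (v-1) ≤ v * v := Nat.mul_le_mul (by omega) (by omega)
             _ ≤ n := hvv) (by omega)

-- ===== VERDICT (by name: the statement is the Claim_ definition above) =====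
theorem constructRectangle3_spec : Claim_equal_constructRectangle3 := by
  intro area _ hpre
  unfold Spec_constructRectangle3
  by_cases h0 : area = 0
  · subst h0; decide
  · -- area ≥ 1
    have hpos : 0 < area := lt_of_le_of_ne hpre (Ne.symm h0)
    set n : Nat := area.toNat with hn
    have harea : (n : Int) = area := Int.toNat_of_nonneg hpre
    set s0 : Nat := Nat.sqrt n with hs0
    have hs01 : 1 ≤ s0 := by
      have := Nat.sqrt_pos.mpr (by omega : 0 < n); omega
    have hs0le : s0 * s0 ≤ n := by have h := Nat.sqrt_le' n; simpa [pow_two] using h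
    set w : Nat := Nat.findGreatest (· ∣ n) s0 with hw
    have hw1 : 1 ≤ w := Nat.le_findGreatest hs01 (one_dvd n)
    have hwle : w ≤ s0 := Nat.findGreatest_le s0
    have hwd : w ∣ n := Nat.findGreatest_spec (P := (· ∣ n)) hs01 (one_dvd n)
    have hmax : ∀ d : Nat, d ∣ n → d * d ≤ n → d ≤ w := by
      intro d hd hdd
      by_contra hcon
      have hds0 : d ≤ s0 := by
        rw [hs0]; exact Nat.le_sqrt'.mpr (by simpa [pow_two] using hdd)
      exact Nat.findGreatest_is_greatest (P := (· ∣ n)) (by omega) hds0 hd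
    set c : Nat := n / w with hc
    have hwc : w * c = n := Nat.mul_div_cancel' hwd
    have hcn : c ≤ n := Nat.div_le_self n w
    have hs0c : s0 ≤ c := by
      have h1 : w * s0 ≤ s0 * s0 := Nat.mul_le_mul_right s0 hwle
      have h2 : w * s0 ≤ w * c := by omega
      exact Nat.le_of_mul_le_mul_left h2 (by omega)
    -- A side
    have hA : constructRectangle3 area = [(c : Int), (w : Int)] := by
      unfold constructRectangle3 intSqrtA
      rw [← harea]
      have : (((n : Int)).toNat) = n := by omega
      rw [this]
      exact loopA_inv n w c hw1 hwc hmax (n+1) s0 s0 hwle (le_refl s0) hs0c (by omega)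
    -- B side
    have hB : constructRectangle3_alt area = [(c : Int), (w : Int)] := by
      unfold constructRectangle3_alt
      rw [if_neg h0, ← harea]
      have : (((n : Int)).toNat) = n := by omega
      rw [this]
      exact loopB_inv n w c hw1 hwc hmax s0 s0 hwle hs0le (by omega)
    rw [hA, hB]
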